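-- pv_equiv track=rewrite | github.com/Harjacober/CodeforcesSolvedProblems | Middle Class.py | solution
-- ===== SOURCE A (Python) =====
-- def solution(arr,x):
--     arr.sort(reverse=True)
--     rem, ans = 0,0
--     i= 0
--     while i < len(arr):
--         summ = arr[i]+rem
--         if summ >= x:
--             ans += 1
--             rem = summ-x
--         i += 1
--
--     return ans
-- ===== SOURCE B (Python) =====
-- def solution(arr, x):
--     arr.sort(reverse=True)
--     pref = [0]
--     for v in arr:
--         pref.append(pref[-1] + v)
--     lo, hi = 0, len(arr)
--     while lo < hi:
--         mid = (lo + hi + 1) // 2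
--         if pref[mid] >= mid * x:
--             lo = mid
--         else:
--             hi = mid - 1
--     return lo
-- ===== Notes on version B (the rewrite author's own statement) =====
-- stated objective: alternative
-- what changed: Replaces the linear greedy scan carrying a running remainder with a prefix-sum table plus a binary search for the largest k whose top-k sum is at least k*x (valid k form a contiguous prefix on the descending-sorted array).
import Mathlib
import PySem

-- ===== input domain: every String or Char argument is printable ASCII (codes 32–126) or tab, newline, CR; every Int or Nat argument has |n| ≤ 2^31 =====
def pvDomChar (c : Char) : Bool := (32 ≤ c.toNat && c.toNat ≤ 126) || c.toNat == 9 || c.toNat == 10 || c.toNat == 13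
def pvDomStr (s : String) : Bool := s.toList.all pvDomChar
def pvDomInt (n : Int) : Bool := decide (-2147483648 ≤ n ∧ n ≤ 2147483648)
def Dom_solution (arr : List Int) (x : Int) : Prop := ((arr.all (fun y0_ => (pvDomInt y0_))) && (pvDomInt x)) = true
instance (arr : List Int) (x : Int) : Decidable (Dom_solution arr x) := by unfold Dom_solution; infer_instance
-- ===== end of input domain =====

-- B replaces A's greedy remainder-carrying scan with a prefix-sum table and a binary search
-- for the largest k with top-k sum ≥ k*x (alternative decomposition, similar cost).
-- Both Pythons sort arr in place (same side effect); the theorems below are about the return value.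

-- ===== PORT A =====
-- A's while-loop walks i = 0..len-1 over the sorted list in order; ported as structural
-- recursion over the remaining suffix with the same (rem, ans) state.
def solutionLoopA (s : List Int) (x : Int) (rem ans : Int) : Int :=
  match s with
  | [] => ans
  | v :: t =>
      let summ := v + rem
      if summ ≥ x then solutionLoopA t x (summ - x) (ans + 1)
      else solutionLoopA t x rem ans

def solution (arr : List Int) (x : Int) : Int :=
  solutionLoopA (PySem.List.sorted arr (fun v => v) true) x 0 0

-- ===== PORT B =====
-- pref = [0]; for v in arr: pref.append(pref[-1] + v)
def prefList (s : List Int) : List Int :=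
  s.foldl (fun p v => p ++ [(PySem.List.pyGet? p (-1)).getD 0 + v]) [0]

-- the while lo < hi binary search; lo, hi are nonnegative Python ints, ported as Nat
-- (Nat division by 2 agrees with Python's //, and mid ≥ 1 whenever mid - 1 is taken).
def bsearchB (pref : List Int) (x : Int) (lo hi : Nat) : Nat :=
  if _h : lo < hi then
    let mid := (lo + hi + 1) / 2
    if (PySem.List.pyGet? pref (mid : Int)).getD 0 ≥ (mid : Int) * x then
      bsearchB pref x mid hi
    else
      bsearchB pref x lo (mid - 1)
  else lo
termination_by hi - lo
decreasing_by all_goals omega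

def solution_alt (arr : List Int) (x : Int) : Int :=
  let s := PySem.List.sorted arr (fun v => v) true
  let pref := prefList s
  (bsearchB pref x 0 s.length : Int)

-- ===== PRECONDITION & SPEC =====
def Spec_solution (arr : List Int) (x : Int) (out : Int) : Prop := out = solution_alt arr x
instance (arr : List Int) (x : Int) (out : Int) : Decidable (Spec_solution arr x out) := by unfold Spec_solution; infer_instance

-- ===== CLAIM (what is proved, stated in full; the proofs are below) =====
def Claim_equal_solution : Prop := ∀ (arr : List Int) (x : Int), Dom_solution arr x → Spec_solution arr x (solution arr x)

-- ===== LEMMAS AND PROOFS =====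

-- the greedy count of A, with the accumulator stripped off
def gd (s : List Int) (x rem : Int) : Nat :=
  match s with
  | [] => 0
  | v :: t => if v + rem ≥ x then 1 + gd t x (v + rem - x) else gd t x rem

theorem loopA_eq_gd (s : List Int) (x rem ans : Int) :
    solutionLoopA s x rem ans = ans + (gd s x rem : Int) := by
  induction s generalizing rem ans with
  | nil => simp [solutionLoopA, gd]
  | cons v t ih =>
      simp only [solutionLoopA, gd]
      split_ifs with h
      · rw [ih]; push_cast; ring
      · rw [ih]

theorem gd_zero (s : List Int) (x rem : Int) (h : ∀ u ∈ s, u + rem < x) :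
    gd s x rem = 0 := by
  induction s with
  | nil => rfl
  | cons v t ih =>
      simp only [gd]
      rw [if_neg (by exact not_le.mpr (h v (by simp)))]
      exact ih (fun u hu => h u (by simp [hu]))

theorem gd_le (s : List Int) (x rem : Int) : gd s x rem ≤ s.length := by
  induction s generalizing rem with
  | nil => simp [gd]
  | cons v t ih =>
      simp only [gd]
      split_ifs with h
      · have := ih (v + rem - x); simp; omega
      · have := ih rem; simp; omega

-- P holds at the greedy count: top-(gd) sum + rem ≥ gd * x
theorem gd_sum_ge (s : List Int) (x rem : Int)
    (hs : s.Pairwise (fun a b => b ≤ a)) (hrem : 0 ≤ rem) :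
    (gd s x rem : Int) * x ≤ (s.take (gd s x rem)).sum + rem := by
  induction s generalizing rem with
  | nil => simpa [gd] using hrem
  | cons v t ih =>
      rcases List.pairwise_cons.mp hs with ⟨hv, ht⟩
      simp only [gd]
      split_ifs with h
      · have hrem' : 0 ≤ v + rem - x := by omega
        have := ih (v + rem - x) ht hrem'
        simp only [Nat.add_comm 1, List.take_succ_cons, List.sum_cons]
        push_cast
        push_cast at this
        linarith
      · rw [gd_zero t x rem (fun u hu => by have := hv u hu; omega)]
        simpa using hrem

-- P fails just past the greedy count (when it is not the whole list)
theorem gd_sum_lt (s : List Int) (x rem : Int)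
    (hs : s.Pairwise (fun a b => b ≤ a)) (hlt : gd s x rem < s.length) :
    (s.take (gd s x rem + 1)).sum + rem < ((gd s x rem : Int) + 1) * x := by
  induction s generalizing rem with
  | nil => simp [gd] at hlt
  | cons v t ih =>
      rcases List.pairwise_cons.mp hs with ⟨hv, ht⟩
      simp only [gd] at hlt ⊢
      split_ifs with h
      · rw [if_pos h] at hlt
        simp only [List.length_cons] at hlt
        have := ih (v + rem - x) ht (by omega)
        simp only [Nat.add_comm 1, Nat.add_assoc, List.take_succ_cons, List.sum_cons]
        push_cast
        push_cast at this
        linarith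
      · rw [if_neg h] at hlt
        rw [gd_zero t x rem (fun u hu => by have := hv u hu; omega)]
        simpa using h

-- elements of a descending list dominate a later element, so the top-k sum is ≥ k·s[k]
theorem take_sum_ge (s : List Int) (k : Nat) (hk : k < s.length)
    (hs : s.Pairwise (fun a b => b ≤ a)) :
    (k : Int) * s[k] ≤ (s.take k).sum := by
  have hlen : (s.take k).length = k := by simp [Nat.le_of_lt hk]
  have hmem : ∀ u ∈ s.take k, s[k] ≤ u := by
    intro u hu
    rcases List.getElem_of_mem hu with ⟨j, hj, rfl⟩
    have hjk : j < k := by omega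
    have := (List.pairwise_iff_getElem.mp hs) j k (by omega) hk hjk
    simpa [List.getElem_take] using this
  have := List.card_nsmul_le_sum (s.take k) (s[k]) hmem
  rwa [hlen, nsmul_eq_mul] at this

-- failure of P propagates upward along a descending list (downward-closed valid ks)
theorem P_up (s : List Int) (x : Int) (hs : s.Pairwise (fun a b => b ≤ a)) :
    ∀ j k : Nat, j ≤ k → k ≤ s.length → (s.take j).sum < (j : Int) * x →
      (s.take k).sum < (k : Int) * x := by
  intro j k hjk hk
  induction k with
  | zero => intro h; interval_cases j; exact h
  | succ m ih =>
      intro hfail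
      rcases Nat.lt_or_ge j (m + 1) with hlt | hge
      · have hm : (s.take m).sum < (m : Int) * x := ih (by omega) (by omega) hfail
        have hmlen : m < s.length := by omega
        have hms : (m : Int) * s[m] ≤ (s.take m).sum := take_sum_ge s m hmlen hs
        have hsm : s[m] < x ∨ m = 0 := by
          rcases Nat.eq_zero_or_pos m with h0 | hpos
          · right; exact h0
          · left
            by_contra hc
            have : (m : Int) * x ≤ (m : Int) * s[m] := by
              apply mul_le_mul_of_nonneg_left (not_lt.mp hc) (by positivity)
            omega
        have htake : (s.take (m + 1)).sum = (s.take m).sum + s[m] := by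
          rw [List.take_add_one, List.sum_append]
          simp [List.getElem?_eq_getElem hmlen]
        rcases hsm with hsm | rfl
        · push_cast; rw [htake]; push_cast at hm; linarith
        · simp at hm
      · have : j = m + 1 := by omega
        subst this; exact hfail

-- prefList computes the prefix sums: pref = [sum of take 0, …, sum of take n]
theorem prefList_aux (s : List Int) (p : List Int) (c : Int) :
    s.foldl (fun p v => p ++ [(PySem.List.pyGet? p (-1)).getD 0 + v]) (p ++ [c]) =
      (p ++ [c]) ++ (List.range s.length).map (fun k => (s.take (k + 1)).sum + c) := by
  induction s generalizing p c with
  | nil => simp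
  | cons v t ih =>
      simp only [List.foldl_cons, PySem.List.pyGet?_neg_one_append_singleton, Option.getD_some]
      rw [ih (p ++ [c]) (c + v)]
      simp only [List.length_cons, List.range_succ_eq_map, List.map_cons, List.map_map,
        List.take_succ_cons, List.sum_cons, List.take_zero, List.sum_nil,
        List.append_assoc, List.cons_append]
      simp [add_comm, add_left_comm, add_assoc]

theorem prefList_get (s : List Int) (k : Nat) (hk : k ≤ s.length) :
    (PySem.List.pyGet? (prefList s) (k : Int)).getD 0 = (s.take k).sum := by
  have h0 : prefList s =
      [(0 : Int)] ++ (List.range s.length).map (fun k => (s.take (k + 1)).sum + 0) := by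
    have := prefList_aux s [] 0
    simpa [prefList] using this
  rw [h0, PySem.List.pyGet?_natCast]
  rcases Nat.eq_zero_or_pos k with rfl | hpos
  · simp
  · have hk1 : k - 1 < s.length := by omega
    rw [show ([(0:Int)] ++ (List.range s.length).map (fun k => (s.take (k + 1)).sum + 0)) =
        (0 : Int) :: (List.range s.length).map (fun k => (s.take (k + 1)).sum + 0) from rfl]
    rcases Nat.exists_eq_add_of_le hpos with ⟨m, rfl⟩
    have hm : m < s.length := by omega
    simp [hm, Nat.add_comm 1 m]

-- binary-search correctness: with P lo true and P false above hi, the loop returns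
-- the unique K with P K true and P (K+1) false (K = gd s x 0)
theorem bsearchB_spec (s : List Int) (x : Int) (hs : s.Pairwise (fun a b => b ≤ a)) :
    ∀ (n lo hi : Nat), hi - lo ≤ n → lo ≤ hi → hi ≤ s.length →
      (s.take lo).sum ≥ (lo : Int) * x →
      (∀ j, hi < j → j ≤ s.length → (s.take j).sum < (j : Int) * x) →
      bsearchB (prefList s) x lo hi = gd s x 0 := by
  intro n
  induction n with
  | zero =>
      intro lo hi hn hle hlo hP hfail
      have heq : lo = hi := by omega
      subst heq
      rw [bsearchB, dif_neg (show ¬ lo < lo by omega)]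
      set K := gd s x 0 with hK
      have hKle : K ≤ s.length := gd_le s x 0
      have hPK : (K : Int) * x ≤ (s.take K).sum := by simpa using gd_sum_ge s x 0 hs le_rfl
      rcases Nat.lt_trichotomy lo K with h | h | h
      · exact absurd hPK (not_le.mpr (hfail K h hKle))
      · exact h
      · exfalso
        have hKlt : K < s.length := by omega
        have hfK : (s.take (K + 1)).sum < ((K : Int) + 1) * x := by
          simpa using gd_sum_lt s x 0 hs hKlt
        have := P_up s x hs (K + 1) lo h hlo (by push_cast; linarith)
        omega
  | succ m ih =>
      intro lo hi hn hle hlo hP hfail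
      by_cases hlt : lo < hi
      · rw [bsearchB, dif_pos hlt]
        have hmid1 : lo < (lo + hi + 1) / 2 := by omega
        have hmid2 : (lo + hi + 1) / 2 ≤ hi := by omega
        simp only [prefList_get s ((lo + hi + 1) / 2) (by omega), ge_iff_le]
        split_ifs with hcond
        · exact ih ((lo + hi + 1) / 2) hi (by omega) hmid2 hlo hcond hfail
        · rw [not_le] at hcond
          refine ih lo ((lo + hi + 1) / 2 - 1) (by omega) (by omega) (by omega) hP ?_
          intro j hj hjlen
          rcases Nat.lt_or_ge hi j with hbig | hsmall
          · exact hfail j hbig hjlen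
          · exact P_up s x hs ((lo + hi + 1) / 2) j (by omega) hjlen hcond
      · have heq : lo = hi := by omega
        subst heq
        exact ih lo lo (by omega) le_rfl hlo hP hfail

-- the sorted list is pairwise descending
theorem sorted_desc (arr : List Int) :
    (PySem.List.sorted arr (fun v => v) true).Pairwise (fun a b => b ≤ a) :=
  PySem.List.sorted_pairwise_rev arr (fun v => v)

-- ===== VERDICT (by name: the statement is the Claim_ definition above) =====
theorem solution_spec : Claim_equal_solution := by
  intro arr x _
  unfold Spec_solution solution solution_alt
  set s := PySem.List.sorted arr (fun v => v) true with hsdef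
  have hs : s.Pairwise (fun a b => b ≤ a) := sorted_desc arr
  rw [loopA_eq_gd]
  show 0 + (gd s x 0 : Int) = (bsearchB (prefList s) x 0 s.length : Int)
  rw [bsearchB_spec s x hs s.length 0 s.length (by omega) (by omega) le_rfl
      (by simp) (by intro j hj hjlen; omega)]
  simp
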